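-- pv_equiv track=rewrite | github.com/iMosapp/marketing | backend/routers/public_review.py | get_safe_logo
-- ===== SOURCE A (Python) =====
-- def get_safe_logo(doc, fallback_doc=None):
--     """Get the sharpest available logo URL. Priority: full logo_url → full logo_path → thumbnail → avatar."""
--     for d in [doc, fallback_doc]:
--         if not d:
--             continue
--         # 1. Full-size logo URL (best quality)
--         logo = d.get("logo_url")
--         if logo and not logo.startswith("data:") and len(logo) < 2000:
--             return logo
--         # 2. Construct URL from logo_path (full-size stored image)
--         logo_path = d.get("logo_path")
--         if logo_path:
--             return f"/api/images/{logo_path}"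
--         # 3. Thumbnail (medium quality)
--         thumb = d.get("logo_thumbnail_url")
--         if thumb and not thumb.startswith("data:"):
--             return thumb
--         # 4. Avatar as last resort (smallest)
--         avatar = d.get("logo_avatar_url")
--         if avatar and not avatar.startswith("data:"):
--             return avatar
--     return ""
-- ===== SOURCE B (Python) =====
-- def _candidates(d, base):
--     """All acceptable logo candidates of one doc, tagged with a priority rank."""
--     out = []
--     u = d.get("logo_url")
--     if u and not u.startswith("data:") and len(u) < 2000:
--         out.append((base, u))
--     p = d.get("logo_path")
--     if p:
--         out.append((base + 1, "/api/images/" + p))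
--     t = d.get("logo_thumbnail_url")
--     if t and not t.startswith("data:"):
--         out.append((base + 2, t))
--     a = d.get("logo_avatar_url")
--     if a and not a.startswith("data:"):
--         out.append((base + 3, a))
--     return out
--
--
-- def get_safe_logo(doc, fallback_doc=None):
--     """Collect every acceptable logo from both docs with a priority rank, then select the best-ranked one."""
--     candidates = []
--     if doc:
--         candidates += _candidates(doc, 0)
--     if fallback_doc:
--         candidates += _candidates(fallback_doc, 4)
--     if not candidates:
--         return ""
--     return min(candidates, key=lambda c: c[0])[1]
-- ===== Notes on version B (the rewrite author's own statement) =====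
-- stated objective: alternative
-- what changed: A short-circuits through a per-doc branch cascade with early returns; B instead materialises the full set of acceptable logo candidates from both docs as rank-tagged pairs and then selects the minimum-rank candidate, trading early exit for a generate-then-select pass.
import Mathlib
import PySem

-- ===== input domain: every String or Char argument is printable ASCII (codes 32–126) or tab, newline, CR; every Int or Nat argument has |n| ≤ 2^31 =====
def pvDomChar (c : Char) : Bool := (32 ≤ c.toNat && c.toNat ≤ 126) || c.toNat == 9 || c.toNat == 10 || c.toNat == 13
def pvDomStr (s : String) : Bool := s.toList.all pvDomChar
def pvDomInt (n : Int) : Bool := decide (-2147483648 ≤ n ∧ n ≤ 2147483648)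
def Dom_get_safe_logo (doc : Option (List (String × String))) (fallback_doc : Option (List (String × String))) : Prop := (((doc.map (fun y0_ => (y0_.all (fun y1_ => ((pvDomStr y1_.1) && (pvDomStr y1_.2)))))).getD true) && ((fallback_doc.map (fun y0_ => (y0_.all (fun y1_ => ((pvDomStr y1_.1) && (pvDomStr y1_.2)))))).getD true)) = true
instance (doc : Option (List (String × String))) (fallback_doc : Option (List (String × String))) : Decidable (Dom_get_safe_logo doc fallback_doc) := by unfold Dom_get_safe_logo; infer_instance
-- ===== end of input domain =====

-- B replaces A's short-circuiting per-doc branch cascade by a generate-then-select pass: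
-- it collects every acceptable logo from both docs as rank-tagged candidates and returns the
-- minimum-rank one (objective: alternative; same return value everywhere).

-- ===== PORT A =====
-- Python truthiness of an Optional[str]: None and "" are falsy.
def pvTruthy (v : Option String) : Bool :=
  match v with
  | none => false
  | some s => s != ""

-- the body of A's loop for one truthy dict d; none = fall through to the next d
def pvATry (d : List (String × String)) : Option String :=
  let logo := (PySem.Dict.mk d).get? "logo_url"
  if pvTruthy logo && !(PySem.Str.startswith (logo.getD "") "data:") &&
      (PySem.Str.len (logo.getD "") < 2000) then logo
  else
    let logo_path := (PySem.Dict.mk d).get? "logo_path"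
    if pvTruthy logo_path then some ("/api/images/" ++ logo_path.getD "")
    else
      let thumb := (PySem.Dict.mk d).get? "logo_thumbnail_url"
      if pvTruthy thumb && !(PySem.Str.startswith (thumb.getD "") "data:") then thumb
      else
        let avatar := (PySem.Dict.mk d).get? "logo_avatar_url"
        if pvTruthy avatar && !(PySem.Str.startswith (avatar.getD "") "data:") then avatar
        else none

-- 'for d in [doc, fallback_doc]' with early returns
def pvALoop : List (Option (List (String × String))) → String
  | [] => ""
  | d :: rest =>
    match d with
    | none => pvALoop rest
    | some dd =>
      if dd = [] then pvALoop rest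
      else
        match pvATry dd with
        | some r => r
        | none => pvALoop rest

def get_safe_logo (doc : Option (List (String × String))) (fallback_doc : Option (List (String × String))) : String :=
  pvALoop [doc, fallback_doc]

-- ===== PORT B =====
-- _candidates(d, base): every acceptable logo of one doc, tagged with a priority rank
def pvCandidates (d : List (String × String)) (base : Nat) : List (Nat × String) :=
  let out : List (Nat × String) := []
  let u := (PySem.Dict.mk d).get? "logo_url"
  let out := if pvTruthy u && !(PySem.Str.startswith (u.getD "") "data:") &&
      (PySem.Str.len (u.getD "") < 2000) then out ++ [(base, u.getD "")] else out
  let p := (PySem.Dict.mk d).get? "logo_path"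
  let out := if pvTruthy p then out ++ [(base + 1, "/api/images/" ++ p.getD "")] else out
  let t := (PySem.Dict.mk d).get? "logo_thumbnail_url"
  let out := if pvTruthy t && !(PySem.Str.startswith (t.getD "") "data:") then out ++ [(base + 2, t.getD "")] else out
  let a := (PySem.Dict.mk d).get? "logo_avatar_url"
  let out := if pvTruthy a && !(PySem.Str.startswith (a.getD "") "data:") then out ++ [(base + 3, a.getD "")] else out
  out

-- min(candidates, key=lambda c: c[0]): first candidate with the smallest rank
def pvMinByRank : (Nat × String) → List (Nat × String) → (Nat × String)
  | best, [] => best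
  | best, c :: cs => pvMinByRank (if c.1 < best.1 then c else best) cs

def get_safe_logo_alt (doc : Option (List (String × String))) (fallback_doc : Option (List (String × String))) : String :=
  let candidates : List (Nat × String) := []
  let candidates := match doc with
    | none => candidates
    | some d => if d = [] then candidates else candidates ++ pvCandidates d 0
  let candidates := match fallback_doc with
    | none => candidates
    | some d => if d = [] then candidates else candidates ++ pvCandidates d 4
  match candidates with
  | [] => ""
  | c :: cs => (pvMinByRank c cs).2

-- ===== PRECONDITION & SPEC =====
def Spec_get_safe_logo (doc : Option (List (String × String))) (fallback_doc : Option (List (String × String))) (out : String) : Prop := out = get_safe_logo_alt doc fallback_doc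
instance (doc : Option (List (String × String))) (fallback_doc : Option (List (String × String))) (out : String) : Decidable (Spec_get_safe_logo doc fallback_doc out) := by unfold Spec_get_safe_logo; infer_instance

-- ===== CLAIM (what is proved, stated in full; the proofs are below) =====
def Claim_equal_get_safe_logo : Prop := ∀ (doc : Option (List (String × String))) (fallback_doc : Option (List (String × String))), Dom_get_safe_logo doc fallback_doc → Spec_get_safe_logo doc fallback_doc (get_safe_logo doc fallback_doc)

-- ===== LEMMAS AND PROOFS =====

-- the candidate list of one doc has strictly increasing ranks, all in [base, base+4)
lemma pvCandidates_ranks (d : List (String × String)) (base : Nat) :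
    (pvCandidates d base).Pairwise (fun a b => a.1 < b.1) ∧
    ∀ c ∈ pvCandidates d base, base ≤ c.1 ∧ c.1 < base + 4 := by
  unfold pvCandidates
  dsimp only
  split_ifs <;> constructor <;> simp

-- min-by-rank keeps the head when every later rank is larger
lemma pvMinByRank_head (best : Nat × String) (cs : List (Nat × String))
    (h : ∀ c ∈ cs, best.1 < c.1) : pvMinByRank best cs = best := by
  induction cs generalizing best with
  | nil => rfl
  | cons c cs ih =>
    have hb : ¬ c.1 < best.1 := by have := h c (by simp); omega
    simp only [pvMinByRank, if_neg hb]
    exact ih best (fun x hx => h x (by simp [hx]))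

-- a truthy optional string is 'some' of its default-read
lemma pvTruthy_getD (o : Option String) (h : pvTruthy o = true) : o = some (o.getD "") := by
  cases o <;> simp_all [pvTruthy]

-- A's cascade on one dict is exactly the head of B's candidate list for that dict
lemma pvATry_head (d : List (String × String)) (base : Nat) :
    pvATry d = ((pvCandidates d base).head?).map Prod.snd := by
  unfold pvATry pvCandidates
  dsimp only
  split_ifs <;> (try simp) <;> exact pvTruthy_getD _ (by simp_all)

lemma pvATry_nil (d : List (String × String)) (base : Nat)
    (h : pvCandidates d base = []) : pvATry d = none := by
  rw [pvATry_head d base, h]; rfl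

lemma pvATry_cons (d : List (String × String)) (base : Nat) (c : Nat × String)
    (cs : List (Nat × String)) (h : pvCandidates d base = c :: cs) : pvATry d = some c.2 := by
  rw [pvATry_head d base, h]; rfl

lemma pvCandidates_nil_doc (base : Nat) : pvCandidates [] base = [] := rfl

-- A's tail loop over just the fallback doc, phrased against B's candidate list
lemma pvFb_nil (d' : List (String × String)) (h : pvCandidates d' 4 = []) :
    pvALoop [some d'] = "" := by
  by_cases hd' : d' = []
  · subst hd'; rfl
  · simp [pvALoop, hd', pvATry_nil d' 4 h]

lemma pvFb_cons (d' : List (String × String)) (c : Nat × String) (cs : List (Nat × String))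
    (h : pvCandidates d' 4 = c :: cs) : pvALoop [some d'] = c.2 := by
  have hd' : d' ≠ [] := by
    rintro rfl
    rw [pvCandidates_nil_doc] at h
    exact absurd h (by simp)
  simp [pvALoop, hd', pvATry_cons d' 4 c cs h]

-- ===== VERDICT (by name: the statement is the Claim_ definition above) =====
theorem get_safe_logo_spec : Claim_equal_get_safe_logo := by
  intro doc fallback_doc _
  unfold Spec_get_safe_logo get_safe_logo get_safe_logo_alt
  cases doc with
  | none =>
    cases fallback_doc with
    | none => rfl
    | some d' =>
      by_cases hd' : d' = []
      · subst hd'; simp [pvALoop]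
      · have hstep : pvALoop [none, some d'] = pvALoop [some d'] := rfl
        rw [hstep]
        cases hcd' : pvCandidates d' 4 with
        | nil => rw [pvFb_nil d' hcd']; simp [hd', hcd']
        | cons c cs =>
          have hpair := (pvCandidates_ranks d' 4).1
          rw [hcd'] at hpair
          have hmin : pvMinByRank c cs = c :=
            pvMinByRank_head c cs (fun x hx => (List.pairwise_cons.mp hpair).1 x hx)
          rw [pvFb_cons d' c cs hcd']
          simp [hd', hcd', hmin]
  | some d =>
    by_cases hd : d = []
    · subst hd
      have hstep : pvALoop [some [], fallback_doc] = pvALoop [fallback_doc] := rfl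
      rw [hstep]
      cases fallback_doc with
      | none => rfl
      | some d' =>
        by_cases hd' : d' = []
        · subst hd'; simp [pvALoop]
        · cases hcd' : pvCandidates d' 4 with
          | nil => rw [pvFb_nil d' hcd']; simp [hd', hcd']
          | cons c cs =>
            have hpair := (pvCandidates_ranks d' 4).1
            rw [hcd'] at hpair
            have hmin : pvMinByRank c cs = c :=
              pvMinByRank_head c cs (fun x hx => (List.pairwise_cons.mp hpair).1 x hx)
            rw [pvFb_cons d' c cs hcd']
            simp [hd', hcd', hmin]
    · -- doc is a nonempty dict
      cases hcd : pvCandidates d 0 with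
      | cons c cs =>
        have h1 := pvATry_cons d 0 c cs hcd
        have hpair := (pvCandidates_ranks d 0).1
        rw [hcd] at hpair
        have hcb := ((pvCandidates_ranks d 0).2 c (by rw [hcd]; simp)).2
        cases fallback_doc with
        | none =>
          have hmin : pvMinByRank c cs = c :=
            pvMinByRank_head c cs (fun x hx => (List.pairwise_cons.mp hpair).1 x hx)
          simp [pvALoop, hd, h1, hcd, hmin]
        | some d' =>
          by_cases hd' : d' = []
          · have hmin : pvMinByRank c cs = c :=
              pvMinByRank_head c cs (fun x hx => (List.pairwise_cons.mp hpair).1 x hx)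
            simp [pvALoop, hd, hd', h1, hcd, hmin]
          · have hmin : pvMinByRank c (cs ++ pvCandidates d' 4) = c := by
              apply pvMinByRank_head
              intro x hx
              rcases List.mem_append.mp hx with h | h
              · exact (List.pairwise_cons.mp hpair).1 x h
              · have := ((pvCandidates_ranks d' 4).2 x h).1
                omega
            simp [pvALoop, hd, hd', h1, hcd, hmin]
      | nil =>
        have h1 := pvATry_nil d 0 hcd
        have hstep : pvALoop [some d, fallback_doc] = pvALoop [fallback_doc] := by
          simp [pvALoop, hd, h1]
        rw [hstep]
        cases fallback_doc with
        | none => simp [pvALoop, hd, hcd]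
        | some d' =>
          by_cases hd' : d' = []
          · subst hd'; simp [pvALoop, hd, hcd]
          · cases hcd' : pvCandidates d' 4 with
            | nil => rw [pvFb_nil d' hcd']; simp [hd, hd', hcd, hcd']
            | cons c cs =>
              have hpair := (pvCandidates_ranks d' 4).1
              rw [hcd'] at hpair
              have hmin : pvMinByRank c cs = c :=
                pvMinByRank_head c cs (fun x hx => (List.pairwise_cons.mp hpair).1 x hx)
              rw [pvFb_cons d' c cs hcd']
              simp [hd, hd', hcd, hcd', hmin]
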